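-- pv_equiv track=rewrite | github.com/jotaaapeee/projeto-jogo-estatistica-descritiva | engine/tilemap.py | _generate_room
-- ===== SOURCE A (Python) =====
-- def _generate_room(width, height, top_left, top_right, top, bottom_left,
--                   bottom_right, bottom, left, right, floor):
--     """Gera uma sala retangular básica"""
--     map_data = []
--     for y in range(height):
--         row = []
--         for x in range(width):
--             if y == 0:
--                 if x == 0:
--                     tile = top_left
--                 elif x == width - 1:
--                     tile = top_right
--                 else:
--                     tile = top
--             elif y == height - 1:
--                 if x == 0:
--                     tile = bottom_left
--                 elif x == width - 1:
--                     tile = bottom_right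
--                 else:
--                     tile = bottom
--             else:
--                 if x == 0:
--                     tile = left
--                 elif x == width - 1:
--                     tile = right
--                 else:
--                     tile = floor
--             row.append(tile)
--         map_data.append(row)
--     return map_data
-- ===== SOURCE B (Python) =====
-- def _generate_room(width, height, top_left, top_right, top, bottom_left,
--                   bottom_right, bottom, left, right, floor):
--     """Gera uma sala retangular básica (row-classification decomposition)."""
--     def build_row(l, m, r):
--         if width <= 0:
--             return []
--         if width == 1:
--             return [l]
--         return [l] + [m] * (width - 2) + [r]
--
--     if height <= 0:
--         return []
--     top_row = build_row(top_left, top, top_right)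
--     if height == 1:
--         return [top_row]
--     return ([top_row]
--             + [build_row(left, floor, right) for _ in range(height - 2)]
--             + [build_row(bottom_left, bottom, bottom_right)])
-- ===== Notes on version B (the rewrite author's own statement) =====
-- stated objective: simpler
-- what changed: Replaces per-cell y/x branching inside nested loops by a per-row classification: a build_row(left, mid, right) helper that assembles [left] + [mid]*(width-2) + [right], used once for the top row, once per interior row and once for the bottom row.
import Mathlib
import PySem

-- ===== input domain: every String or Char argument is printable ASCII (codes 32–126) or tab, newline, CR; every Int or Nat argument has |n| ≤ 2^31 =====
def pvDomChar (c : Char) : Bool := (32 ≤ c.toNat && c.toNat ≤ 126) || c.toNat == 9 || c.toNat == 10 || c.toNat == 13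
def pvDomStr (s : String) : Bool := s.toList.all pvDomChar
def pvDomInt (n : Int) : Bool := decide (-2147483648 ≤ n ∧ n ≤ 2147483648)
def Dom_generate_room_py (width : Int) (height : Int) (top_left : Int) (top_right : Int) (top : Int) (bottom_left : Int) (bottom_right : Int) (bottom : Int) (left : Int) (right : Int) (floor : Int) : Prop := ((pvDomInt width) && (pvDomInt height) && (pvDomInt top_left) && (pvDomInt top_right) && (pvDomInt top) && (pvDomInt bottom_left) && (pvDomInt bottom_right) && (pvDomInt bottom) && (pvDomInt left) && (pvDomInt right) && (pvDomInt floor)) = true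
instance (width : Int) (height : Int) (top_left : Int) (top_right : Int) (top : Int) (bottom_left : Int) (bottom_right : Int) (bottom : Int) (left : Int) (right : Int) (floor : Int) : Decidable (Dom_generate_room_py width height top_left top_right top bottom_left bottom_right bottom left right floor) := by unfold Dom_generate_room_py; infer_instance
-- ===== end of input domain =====

-- B replaces A's per-cell y/x branching inside nested loops by a per-row classification with a build_row helper; objective: simpler.

-- ===== PORT A =====
def generate_room_py (width : Int) (height : Int) (top_left : Int) (top_right : Int) (top : Int) (bottom_left : Int) (bottom_right : Int) (bottom : Int) (left : Int) (right : Int) (floor : Int) : List (List Int) :=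
  (PySem.List.pyRange 0 height 1).foldl (fun map_data y =>
    map_data ++ [(PySem.List.pyRange 0 width 1).foldl (fun row x =>
      row ++ [if y = 0 then
                (if x = 0 then top_left else if x = width - 1 then top_right else top)
              else if y = height - 1 then
                (if x = 0 then bottom_left else if x = width - 1 then bottom_right else bottom)
              else
                (if x = 0 then left else if x = width - 1 then right else floor)]) []]) []

-- ===== PORT B =====
def pvBuildRow (width : Int) (l m r : Int) : List Int :=
  if width ≤ 0 then []
  else if width = 1 then [l]
  else [l] ++ List.replicate (width - 2).toNat m ++ [r]

def generate_room_py_alt (width : Int) (height : Int) (top_left : Int) (top_right : Int) (top : Int) (bottom_left : Int) (bottom_right : Int) (bottom : Int) (left : Int) (right : Int) (floor : Int) : List (List Int) :=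
  if height ≤ 0 then []
  else
    let top_row := pvBuildRow width top_left top top_right
    if height = 1 then [top_row]
    else [top_row]
      ++ (PySem.List.pyRange 0 (height - 2) 1).map (fun _ => pvBuildRow width left floor right)
      ++ [pvBuildRow width bottom_left bottom bottom_right]

-- ===== PRECONDITION & SPEC =====
def Spec_generate_room_py (width : Int) (height : Int) (top_left : Int) (top_right : Int) (top : Int) (bottom_left : Int) (bottom_right : Int) (bottom : Int) (left : Int) (right : Int) (floor : Int) (out : List (List Int)) : Prop := out = generate_room_py_alt width height top_left top_right top bottom_left bottom_right bottom left right floor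
instance (width : Int) (height : Int) (top_left : Int) (top_right : Int) (top : Int) (bottom_left : Int) (bottom_right : Int) (bottom : Int) (left : Int) (right : Int) (floor : Int) (out : List (List Int)) : Decidable (Spec_generate_room_py width height top_left top_right top bottom_left bottom_right bottom left right floor out) := by unfold Spec_generate_room_py; infer_instance

-- ===== CLAIM =====
def Claim_equal_generate_room_py : Prop := ∀ (width : Int) (height : Int) (top_left : Int) (top_right : Int) (top : Int) (bottom_left : Int) (bottom_right : Int) (bottom : Int) (left : Int) (right : Int) (floor : Int), Dom_generate_room_py width height top_left top_right top bottom_left bottom_right bottom left right floor → Spec_generate_room_py width height top_left top_right top bottom_left bottom_right bottom left right floor (generate_room_py width height top_left top_right top bottom_left bottom_right bottom left right floor)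

-- ===== LEMMAS AND PROOFS =====
theorem pv_border_map {α : Type} (a m z : α) (n : Nat) (h2 : 2 ≤ n) (g : Nat → α)
    (hg0 : g 0 = a) (hgl : g (n - 1) = z) (hgm : ∀ k, k ≠ 0 → k ≠ n - 1 → g k = m) :
    (List.range n).map g = [a] ++ List.replicate (n - 2) m ++ [z] := by
  apply List.ext_getElem
  · simp; omega
  · intro i hi hi'
    simp only [List.getElem_map, List.getElem_range]
    rcases i with _ | j
    · simpa using hg0
    · have hin : j + 1 < n := by simpa using hi
      have hj' : j < (List.replicate (n - 2) m ++ [z]).length := by simp; omega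
      rw [show ([a] ++ List.replicate (n - 2) m ++ [z])[j + 1] = (List.replicate (n - 2) m ++ [z])[j] from by
        simp [List.getElem_append]]
      by_cases hl : j + 1 = n - 1
      · have hj2 : ¬ j < n - 2 := by omega
        rw [List.getElem_append_right (by simpa using hj2)]
        simpa [hl] using hgl
      · have hj2 : j < n - 2 := by omega
        rw [List.getElem_append_left (by simpa using hj2)]
        rw [List.getElem_replicate]
        exact hgm (j+1) (by omega) hl

theorem pv_row_eq (width l m r : Int) (f : Int → Int)
    (hf : ∀ x, f x = if x = 0 then l else if x = width - 1 then r else m) :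
    (PySem.List.pyRange 0 width 1).foldl (fun row x => row ++ [f x]) []
      = pvBuildRow width l m r := by
  rw [PySem.List.foldl_append_singleton_eq_map, PySem.List.pyRange_one]
  simp only [Int.sub_zero, List.map_map, List.nil_append]
  have hcomp : (f ∘ fun k : Nat => (0 : Int) + (k : Int)) = fun k : Nat => f (k : Int) := by
    funext k; simp
  rw [hcomp]
  by_cases h0 : width ≤ 0
  · have : width.toNat = 0 := by omega
    simp [this, pvBuildRow, h0]
  · by_cases h1 : width = 1
    · subst h1
      simp [pvBuildRow, hf]
    · have h2 : 2 ≤ width.toNat := by omega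
      rw [pv_border_map l m r width.toNat h2 _
        (by rw [hf]; simp)
        (by rw [hf]
            have e1 : ((width.toNat - 1 : Nat) : Int) = width - 1 := by omega
            have e2 : width - 1 ≠ 0 := by omega
            rw [e1, if_neg e2, if_pos rfl])
        (by intro k hk0 hkl
            rw [hf]
            have e1 : (k : Int) ≠ 0 := by omega
            have e2 : (k : Int) ≠ width - 1 := by omega
            rw [if_neg e1, if_neg e2])]
      have hw2 : (width - 2).toNat = width.toNat - 2 := by omega
      simp [pvBuildRow, h0, h1, hw2]

theorem generate_room_py_eq (width height top_left top_right top bottom_left bottom_right bottom left right floor : Int) :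
    generate_room_py width height top_left top_right top bottom_left bottom_right bottom left right floor
      = generate_room_py_alt width height top_left top_right top bottom_left bottom_right bottom left right floor := by
  have hrow : ∀ y : Int,
      (PySem.List.pyRange 0 width 1).foldl (fun row x =>
        row ++ [if y = 0 then
                  (if x = 0 then top_left else if x = width - 1 then top_right else top)
                else if y = height - 1 then
                  (if x = 0 then bottom_left else if x = width - 1 then bottom_right else bottom)
                else
                  (if x = 0 then left else if x = width - 1 then right else floor)]) []
      = (if y = 0 then pvBuildRow width top_left top top_right
         else if y = height - 1 then pvBuildRow width bottom_left bottom bottom_right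
         else pvBuildRow width left floor right) := by
    intro y
    by_cases hy0 : y = 0
    · rw [if_pos hy0]
      exact pv_row_eq width top_left top top_right _ (fun x => by rw [if_pos hy0])
    · rw [if_neg hy0]
      by_cases hyl : y = height - 1
      · rw [if_pos hyl]
        exact pv_row_eq width bottom_left bottom bottom_right _ (fun x => by rw [if_neg hy0, if_pos hyl])
      · rw [if_neg hyl]
        exact pv_row_eq width left floor right _ (fun x => by rw [if_neg hy0, if_neg hyl])
  unfold generate_room_py
  rw [PySem.List.foldl_append_singleton_eq_map]
  rw [List.map_congr_left (g := fun y : Int =>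
      (if y = 0 then pvBuildRow width top_left top top_right
       else if y = height - 1 then pvBuildRow width bottom_left bottom bottom_right
       else pvBuildRow width left floor right)) (fun y _ => hrow y)]
  rw [PySem.List.pyRange_one]
  simp only [Int.sub_zero, List.map_map, List.nil_append]
  rw [show ((fun y : Int =>
        (if y = 0 then pvBuildRow width top_left top top_right
         else if y = height - 1 then pvBuildRow width bottom_left bottom bottom_right
         else pvBuildRow width left floor right))
        ∘ fun k : Nat => (0 : Int) + (k : Int))
      = (fun k : Nat =>
          (if (k : Int) = 0 then pvBuildRow width top_left top top_right
           else if (k : Int) = height - 1 then pvBuildRow width bottom_left bottom bottom_right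
           else pvBuildRow width left floor right)) from by
    funext k
    simp only [Function.comp_apply, Int.zero_add]]
  by_cases h0 : height ≤ 0
  · have : height.toNat = 0 := by omega
    simp [this, generate_room_py_alt, h0]
  · by_cases h1 : height = 1
    · subst h1
      simp [generate_room_py_alt]
    · have h2 : 2 ≤ height.toNat := by omega
      rw [pv_border_map (α := List Int)
        (pvBuildRow width top_left top top_right)
        (pvBuildRow width left floor right)
        (pvBuildRow width bottom_left bottom bottom_right)
        height.toNat h2 _
        (by simp)
        (by have e1 : ((height.toNat - 1 : Nat) : Int) = height - 1 := by omega
            have e2 : height - 1 ≠ 0 := by omega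
            rw [e1, if_neg e2, if_pos rfl])
        (by intro k hk0 hkl
            have e1 : (k : Int) ≠ 0 := by omega
            have e2 : (k : Int) ≠ height - 1 := by omega
            rw [if_neg e1, if_neg e2])]
      unfold generate_room_py_alt
      rw [if_neg h0, if_neg h1, PySem.List.pyRange_one]
      simp only [Int.sub_zero, List.map_map, Function.comp_def]
      rw [List.map_const', List.length_range,
        show (height - 2).toNat = height.toNat - 2 from by omega]

-- ===== VERDICT =====
theorem generate_room_py_spec : Claim_equal_generate_room_py := by
  intro width height top_left top_right top bottom_left bottom_right bottom left right floor _
  unfold Spec_generate_room_py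
  exact generate_room_py_eq width height top_left top_right top bottom_left bottom_right bottom left right floor
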